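-- pv_equiv track=rewrite | github.com/AlonsoAlviraa/Poly | src/scripts/dynamic_enricher.py | detect_sport
-- ===== SOURCE A (Python) =====
-- from typing import List, Dict, Optional, Set
--
-- def detect_sport(slug: str) -> Optional[str]:
--     """Detect sport from slug with exclusion rules."""
--     s = slug.lower()
--
--     # 1. Exclusion List (Politics, Crypto, Entertainment)
--     exclusions = ['election', 'politics', 'senate', 'governor', 'president', 'crypto', 'bitcoin', 'eth', 'price', 'movie', 'oscars']
--     if any(x in s for x in exclusions):
--         return None
--
--     # 2. Specific Sports
--     if 'soccer' in s or 'premier-league' in s or 'la-liga' in s or 'serie-a' in s or 'bundesliga' in s or 'ligue-1' in s or 'mls' in s: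
--         return "soccer"
--     elif 'nba' in s or 'basketball' in s or 'euroleague' in s or 'wnba' in s:
--         return "basketball"
--     elif 'tennis' in s or 'atp' in s or 'wta' in s:
--         return "tennis"
--     elif 'nhl' in s or 'hockey' in s:
--         return "ice_hockey"
--     elif 'nfl' in s or 'football' in s or 'ncaa-football' in s:
--         return "american_football"
--     elif 'baseball' in s or 'mlb' in s:
--         return "baseball"
--
--     # 3. Generic fallback (Only if it looks like a matchup)
--     if any(x in s for x in ['vs', 'defeats', 'beats']):
--         return "soccer" # Matchups default to soccer if not specified
--
--     return None
-- ===== SOURCE B (Python) =====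
-- # Multi-pattern substring search: one scan of the slug, hash-table lookup of
-- # each candidate window against a keyword->priority index, keeping the minimum
-- # priority seen (Rabin-Karp-style window scan instead of per-keyword searches).
-- KEYWORD_RANK = {
--     'election': 0, 'politics': 0, 'senate': 0, 'governor': 0, 'president': 0,
--     'crypto': 0, 'bitcoin': 0, 'eth': 0, 'price': 0, 'movie': 0, 'oscars': 0,
--     'soccer': 1, 'premier-league': 1, 'la-liga': 1, 'serie-a': 1,
--     'bundesliga': 1, 'ligue-1': 1, 'mls': 1,
--     'nba': 2, 'basketball': 2, 'euroleague': 2, 'wnba': 2,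
--     'tennis': 3, 'atp': 3, 'wta': 3,
--     'nhl': 4, 'hockey': 4,
--     'nfl': 5, 'football': 5, 'ncaa-football': 5,
--     'baseball': 6, 'mlb': 6,
--     'vs': 7, 'defeats': 7, 'beats': 7,
-- }
-- RESULT_BY_RANK = [None, 'soccer', 'basketball', 'tennis', 'ice_hockey',
--                   'american_football', 'baseball', 'soccer']
-- KEYWORD_LENGTHS = sorted({len(k) for k in KEYWORD_RANK})
--
-- def detect_sport(slug):
--     s = slug.lower()
--     best = 8
--     for i in range(len(s)):
--         for L in KEYWORD_LENGTHS:
--             r = KEYWORD_RANK.get(s[i:i + L])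
--             if r is not None and r < best:
--                 best = r
--     return None if best == 8 else RESULT_BY_RANK[best]
-- ===== Notes on version B (the rewrite author's own statement) =====
-- stated objective: alternative
-- what changed: Instead of running a separate substring search for every keyword through an if/elif cascade, B scans the slug once and looks each candidate window s[i:i+L] up in a keyword-to-priority hash table, keeping the minimum priority seen; the answer is read off a priority-indexed result table.
import Mathlib
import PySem

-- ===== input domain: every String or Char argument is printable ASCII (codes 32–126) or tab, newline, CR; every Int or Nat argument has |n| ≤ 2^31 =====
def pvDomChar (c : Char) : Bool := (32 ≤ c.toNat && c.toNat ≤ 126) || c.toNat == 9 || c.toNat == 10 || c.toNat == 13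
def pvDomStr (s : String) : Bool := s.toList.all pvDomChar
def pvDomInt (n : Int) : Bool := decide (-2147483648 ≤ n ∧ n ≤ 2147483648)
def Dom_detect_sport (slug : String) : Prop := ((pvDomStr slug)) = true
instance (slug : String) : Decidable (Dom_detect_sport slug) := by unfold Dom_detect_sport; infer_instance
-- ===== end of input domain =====

-- B replaces A's per-keyword substring-search cascade by a single window scan of the slug:
-- every candidate window s[i:i+L] is looked up in a keyword -> priority hash index and the
-- minimum priority seen decides the answer (objective: alternative multi-pattern algorithm).

-- ===== PORT A =====
def detect_sport (slug : String) : Option String :=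
  let s := PySem.Str.lower slug
  if (["election", "politics", "senate", "governor", "president", "crypto", "bitcoin", "eth", "price", "movie", "oscars"].any
      (fun x => PySem.Str.isIn x s)) then
    none
  else if PySem.Str.isIn "soccer" s || PySem.Str.isIn "premier-league" s || PySem.Str.isIn "la-liga" s ||
      PySem.Str.isIn "serie-a" s || PySem.Str.isIn "bundesliga" s || PySem.Str.isIn "ligue-1" s ||
      PySem.Str.isIn "mls" s then
    some "soccer"
  else if PySem.Str.isIn "nba" s || PySem.Str.isIn "basketball" s || PySem.Str.isIn "euroleague" s ||
      PySem.Str.isIn "wnba" s then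
    some "basketball"
  else if PySem.Str.isIn "tennis" s || PySem.Str.isIn "atp" s || PySem.Str.isIn "wta" s then
    some "tennis"
  else if PySem.Str.isIn "nhl" s || PySem.Str.isIn "hockey" s then
    some "ice_hockey"
  else if PySem.Str.isIn "nfl" s || PySem.Str.isIn "football" s || PySem.Str.isIn "ncaa-football" s then
    some "american_football"
  else if PySem.Str.isIn "baseball" s || PySem.Str.isIn "mlb" s then
    some "baseball"
  else if (["vs", "defeats", "beats"].any (fun x => PySem.Str.isIn x s)) then
    some "soccer"
  else
    none

-- ===== PORT B =====
-- the KEYWORD_RANK dict of Source B, as its (key, priority) entry list (insertion order)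
def pvEntries : List (List Char × Nat) :=
  [("election".toList, 0), ("politics".toList, 0), ("senate".toList, 0), ("governor".toList, 0),
   ("president".toList, 0), ("crypto".toList, 0), ("bitcoin".toList, 0), ("eth".toList, 0),
   ("price".toList, 0), ("movie".toList, 0), ("oscars".toList, 0),
   ("soccer".toList, 1), ("premier-league".toList, 1), ("la-liga".toList, 1), ("serie-a".toList, 1),
   ("bundesliga".toList, 1), ("ligue-1".toList, 1), ("mls".toList, 1),
   ("nba".toList, 2), ("basketball".toList, 2), ("euroleague".toList, 2), ("wnba".toList, 2),
   ("tennis".toList, 3), ("atp".toList, 3), ("wta".toList, 3),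
   ("nhl".toList, 4), ("hockey".toList, 4),
   ("nfl".toList, 5), ("football".toList, 5), ("ncaa-football".toList, 5),
   ("baseball".toList, 6), ("mlb".toList, 6),
   ("vs".toList, 7), ("defeats".toList, 7), ("beats".toList, 7)]

def pvKeywordRank : PySem.Dict (List Char) Nat := PySem.Dict.ofList pvEntries

def pvResultByRank : List (Option String) :=
  [none, some "soccer", some "basketball", some "tennis", some "ice_hockey",
   some "american_football", some "baseball", some "soccer"]

-- KEYWORD_LENGTHS = sorted({len(k) for k in KEYWORD_RANK})
def pvKeywordLengths : List Nat :=
  PySem.List.sorted (PySem.Set.ofList (pvEntries.map (fun p => p.1.length))) (fun x => x) false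

-- the window-scan loop of Source B: minimum priority of any dict hit over all windows
def pvBest (s : List Char) : Nat :=
  (PySem.List.pyRange 0 (s.length : Int) 1).foldl
    (fun best i => pvKeywordLengths.foldl
      (fun best L =>
        match PySem.Dict.get? pvKeywordRank (PySem.List.slice s (some i) (some (i + (L : Int)))) with
        | some r => if r < best then r else best
        | none => best) best) 8

def detect_sport_alt (slug : String) : Option String :=
  let s := (PySem.Str.lower slug).toList
  let best := pvBest s
  if best = 8 then none else pvResultByRank.getD best none

-- ===== PRECONDITION & SPEC =====
def Spec_detect_sport (slug : String) (out : Option String) : Prop := out = detect_sport_alt slug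
instance (slug : String) (out : Option String) : Decidable (Spec_detect_sport slug out) := by unfold Spec_detect_sport; infer_instance

-- ===== CLAIM (what is proved, stated in full; the proofs are below) =====
def Claim_equal_detect_sport : Prop := ∀ (slug : String), Dom_detect_sport slug → Spec_detect_sport slug (detect_sport slug)

-- ===== LEMMAS AND PROOFS =====

-- g s p = the dict hit (if any) of the window starting at p.1 of length p.2
def pvG (s : List Char) (p : Int × Nat) : Option Nat :=
  PySem.Dict.get? pvKeywordRank (PySem.List.slice s (some p.1) (some (p.1 + (p.2 : Int))))

def pvMinStep {α : Type} (g : α → Option Nat) (b : Nat) (x : α) : Nat :=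
  match g x with | some r => if r < b then r else b | none => b

def pvPairs (s : List Char) : List (Int × Nat) :=
  (PySem.List.pyRange 0 (s.length : Int) 1).flatMap (fun i => pvKeywordLengths.map (fun L => (i, L)))

-- r is a live priority: some keyword of priority r occurs in s
def pvCand (s : List Char) (r : Nat) : Prop :=
  ∃ k, (k, r) ∈ pvEntries ∧ PySem.Chars.isIn k s = true

set_option maxRecDepth 4096 in
lemma pv_items : pvKeywordRank.items = pvEntries := by decide

set_option maxRecDepth 4096 in
lemma pv_nodup_keys : pvKeywordRank.keys.Nodup := by decide

set_option maxRecDepth 4096 in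
lemma pv_entry_facts : ∀ p ∈ pvEntries, p.1 ≠ [] ∧ p.1.length ∈ pvKeywordLengths ∧ p.2 ≤ 7 := by decide

lemma pvMinStep_none {α : Type} {g : α → Option Nat} {x : α} (b : Nat) (hg : g x = none) :
    pvMinStep g b x = b := by simp [pvMinStep, hg]

lemma pvMinStep_some {α : Type} {g : α → Option Nat} {x : α} {r : Nat} (b : Nat) (hg : g x = some r) :
    pvMinStep g b x = if r < b then r else b := by simp [pvMinStep, hg]

lemma pv_get?_iff (w : List Char) (r : Nat) :
    PySem.Dict.get? pvKeywordRank w = some r ↔ (w, r) ∈ pvEntries := by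
  rw [PySem.Dict.get?_eq_some_iff_mem_items _ _ _ pv_nodup_keys, pv_items]

lemma foldl_foldl_eq_foldl_flatMap {α β γ : Type} (h : γ → α × β → γ) (xs : List α) (ys : List β) (b : γ) :
    xs.foldl (fun acc i => ys.foldl (fun acc y => h acc (i, y)) acc) b
      = (xs.flatMap (fun i => ys.map (fun y => (i, y)))).foldl h b := by
  induction xs generalizing b with
  | nil => rfl
  | cons x xs ih => simp only [List.foldl_cons, List.flatMap_cons, List.foldl_append, List.foldl_map, ih]

set_option maxRecDepth 10000 in
lemma pvBest_eq (s : List Char) : pvBest s = (pvPairs s).foldl (pvMinStep (pvG s)) 8 := by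
  rw [pvPairs, ← foldl_foldl_eq_foldl_flatMap (pvMinStep (pvG s))]
  unfold pvBest
  rfl

lemma minfold_le {α : Type} (g : α → Option Nat) (xs : List α) (b : Nat) :
    xs.foldl (pvMinStep g) b ≤ b := by
  induction xs generalizing b with
  | nil => simp
  | cons x xs ih =>
    refine le_trans (ih _) ?_
    cases hg : g x with
    | none => rw [pvMinStep_none b hg]
    | some r => rw [pvMinStep_some b hg]; split <;> omega

lemma minfold_mem {α : Type} (g : α → Option Nat) (xs : List α) (b : Nat) :
    xs.foldl (pvMinStep g) b = b ∨ ∃ x ∈ xs, g x = some (xs.foldl (pvMinStep g) b) := by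
  induction xs generalizing b with
  | nil => exact Or.inl rfl
  | cons x xs ih =>
    rcases ih (pvMinStep g b x) with h | h
    · rw [List.foldl_cons, h]
      cases hg : g x with
      | none => exact Or.inl (pvMinStep_none b hg)
      | some r =>
        rw [pvMinStep_some b hg]
        by_cases hr : r < b
        · exact Or.inr ⟨x, List.mem_cons_self, by rw [if_pos hr]; exact hg⟩
        · rw [if_neg hr]; exact Or.inl rfl
    · obtain ⟨y, hy, hgy⟩ := h
      exact Or.inr ⟨y, List.mem_cons_of_mem _ hy, hgy⟩

lemma minfold_min {α : Type} (g : α → Option Nat) (xs : List α) (b : Nat) :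
    ∀ x ∈ xs, ∀ r, g x = some r → xs.foldl (pvMinStep g) b ≤ r := by
  induction xs generalizing b with
  | nil => intro x hx; cases hx
  | cons y ys ih =>
    intro x hx r hr
    rcases List.mem_cons.mp hx with h | h
    · subst h
      refine le_trans (minfold_le g ys _) ?_
      rw [pvMinStep_some b hr]
      split <;> omega
    · exact ih _ x h r hr

lemma mem_pvPairs {s : List Char} {p : Int × Nat} :
    p ∈ pvPairs s ↔ (0 ≤ p.1 ∧ p.1 < (s.length : Int)) ∧ p.2 ∈ pvKeywordLengths := by
  unfold pvPairs
  simp only [List.mem_flatMap, List.mem_map]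
  constructor
  · rintro ⟨i, hi, L, hL, rfl⟩
    exact ⟨PySem.List.mem_pyRange_one.mp hi, hL⟩
  · rintro ⟨hi, hL⟩
    exact ⟨p.1, PySem.List.mem_pyRange_one.mpr hi, p.2, hL, rfl⟩

lemma pvCand_of_hit {s : List Char} {p : Int × Nat} {r : Nat}
    (hp : p ∈ pvPairs s) (hg : pvG s p = some r) : pvCand s r := by
  obtain ⟨i, L⟩ := p
  obtain ⟨⟨h0, _⟩, _⟩ := mem_pvPairs.mp hp
  obtain ⟨j, rfl⟩ := Int.eq_ofNat_of_zero_le h0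
  unfold pvG at hg
  rw [PySem.List.slice_natCast_add] at hg
  refine ⟨_, (pv_get?_iff _ _).mp hg, ?_⟩
  exact (PySem.Chars.isIn_iff_infix _ _).mpr
    (((List.take_prefix _ _).isInfix).trans ((List.drop_suffix j s).isInfix))

lemma hit_of_pvCand {s : List Char} {r : Nat} (h : pvCand s r) :
    ∃ p ∈ pvPairs s, pvG s p = some r := by
  obtain ⟨k, hk, hin⟩ := h
  obtain ⟨hne, hlen, -⟩ := pv_entry_facts _ hk
  obtain ⟨j, hpre⟩ := (PySem.Chars.exists_prefix_drop_iff_isIn k s).mpr hin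
  have hj : j < s.length := by
    by_contra hge
    have : s.drop j = [] := List.drop_eq_nil_of_le (by omega)
    rw [this] at hpre
    exact hne (List.prefix_nil.mp hpre)
  refine ⟨((j : Int), k.length), mem_pvPairs.mpr ⟨⟨Int.natCast_nonneg j, by show (j : Int) < (s.length : Int); exact_mod_cast hj⟩, hlen⟩, ?_⟩
  unfold pvG
  rw [PySem.List.slice_natCast_add, ← List.prefix_iff_eq_take.mp hpre]
  exact (pv_get?_iff _ _).mpr hk

-- the facts about pvBest the verdict needs
lemma pvBest_achieved (s : List Char) : pvBest s = 8 ∨ pvCand s (pvBest s) := by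
  rw [pvBest_eq]
  rcases minfold_mem (pvG s) (pvPairs s) 8 with h | ⟨p, hp, hg⟩
  · exact Or.inl h
  · exact Or.inr (pvCand_of_hit hp hg)

lemma pvBest_min (s : List Char) {r : Nat} (h : pvCand s r) : pvBest s ≤ r := by
  rw [pvBest_eq]
  obtain ⟨p, hp, hg⟩ := hit_of_pvCand h
  exact minfold_min _ _ _ p hp r hg

lemma pvCand_le (s : List Char) {r : Nat} (h : pvCand s r) : r ≤ 7 := by
  obtain ⟨k, hk, -⟩ := h
  exact (pv_entry_facts _ hk).2.2

-- per-priority unfoldings of pvCand into the keyword disjunctions A tests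

-- the keywords of priority r, in entry order
def pvGroup (r : Nat) : List (List Char) :=
  (pvEntries.filter (fun p => p.2 == r)).map Prod.fst

lemma pvCand_iff_group (s : List Char) (r : Nat) :
    pvCand s r ↔ ∃ k ∈ pvGroup r, PySem.Chars.isIn k s = true := by
  unfold pvCand pvGroup
  constructor
  · rintro ⟨k, hk, hin⟩
    exact ⟨k, List.mem_map.mpr ⟨(k, r), List.mem_filter.mpr ⟨hk, by simp⟩, rfl⟩, hin⟩
  · rintro ⟨k, hkg, hin⟩
    obtain ⟨p, hp, rfl⟩ := List.mem_map.mp hkg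
    obtain ⟨hmem, hr⟩ := List.mem_filter.mp hp
    have h2 : p.2 = r := by simpa using hr
    exact ⟨p.1, by rw [← h2]; exact hmem, hin⟩

set_option maxHeartbeats 1000000 in
lemma pvGroup_zero : pvGroup 0 = ["election".toList, "politics".toList, "senate".toList, "governor".toList, "president".toList, "crypto".toList, "bitcoin".toList, "eth".toList, "price".toList, "movie".toList, "oscars".toList] := by
  simp [pvGroup, pvEntries]

lemma pvCand0_iff (s : List Char) : pvCand s 0 ↔
    (PySem.Chars.isIn "election".toList s = true ∨
     PySem.Chars.isIn "politics".toList s = true ∨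
     PySem.Chars.isIn "senate".toList s = true ∨
     PySem.Chars.isIn "governor".toList s = true ∨
     PySem.Chars.isIn "president".toList s = true ∨
     PySem.Chars.isIn "crypto".toList s = true ∨
     PySem.Chars.isIn "bitcoin".toList s = true ∨
     PySem.Chars.isIn "eth".toList s = true ∨
     PySem.Chars.isIn "price".toList s = true ∨
     PySem.Chars.isIn "movie".toList s = true ∨
     PySem.Chars.isIn "oscars".toList s = true) := by
  rw [pvCand_iff_group, pvGroup_zero]
  constructor
  · rintro ⟨k, hk, hin⟩
    simp only [List.mem_cons, List.not_mem_nil, or_false] at hk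
    rcases hk with rfl|rfl|rfl|rfl|rfl|rfl|rfl|rfl|rfl|rfl|rfl
    exacts [Or.inl hin,
      Or.inr (Or.inl hin),
      Or.inr (Or.inr (Or.inl hin)),
      Or.inr (Or.inr (Or.inr (Or.inl hin))),
      Or.inr (Or.inr (Or.inr (Or.inr (Or.inl hin)))),
      Or.inr (Or.inr (Or.inr (Or.inr (Or.inr (Or.inl hin))))),
      Or.inr (Or.inr (Or.inr (Or.inr (Or.inr (Or.inr (Or.inl hin)))))),
      Or.inr (Or.inr (Or.inr (Or.inr (Or.inr (Or.inr (Or.inr (Or.inl hin))))))),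
      Or.inr (Or.inr (Or.inr (Or.inr (Or.inr (Or.inr (Or.inr (Or.inr (Or.inl hin)))))))),
      Or.inr (Or.inr (Or.inr (Or.inr (Or.inr (Or.inr (Or.inr (Or.inr (Or.inr (Or.inl hin))))))))),
      Or.inr (Or.inr (Or.inr (Or.inr (Or.inr (Or.inr (Or.inr (Or.inr (Or.inr (Or.inr (hin))))))))))]
  · intro h
    rcases h with h|h|h|h|h|h|h|h|h|h|h
    exacts [⟨_, List.mem_cons_self, h⟩,
      ⟨_, List.mem_cons_of_mem _ (List.mem_cons_self), h⟩,
      ⟨_, List.mem_cons_of_mem _ (List.mem_cons_of_mem _ (List.mem_cons_self)), h⟩,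
      ⟨_, List.mem_cons_of_mem _ (List.mem_cons_of_mem _ (List.mem_cons_of_mem _ (List.mem_cons_self))), h⟩,
      ⟨_, List.mem_cons_of_mem _ (List.mem_cons_of_mem _ (List.mem_cons_of_mem _ (List.mem_cons_of_mem _ (List.mem_cons_self)))), h⟩,
      ⟨_, List.mem_cons_of_mem _ (List.mem_cons_of_mem _ (List.mem_cons_of_mem _ (List.mem_cons_of_mem _ (List.mem_cons_of_mem _ (List.mem_cons_self))))), h⟩,
      ⟨_, List.mem_cons_of_mem _ (List.mem_cons_of_mem _ (List.mem_cons_of_mem _ (List.mem_cons_of_mem _ (List.mem_cons_of_mem _ (List.mem_cons_of_mem _ (List.mem_cons_self)))))), h⟩,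
      ⟨_, List.mem_cons_of_mem _ (List.mem_cons_of_mem _ (List.mem_cons_of_mem _ (List.mem_cons_of_mem _ (List.mem_cons_of_mem _ (List.mem_cons_of_mem _ (List.mem_cons_of_mem _ (List.mem_cons_self))))))), h⟩,
      ⟨_, List.mem_cons_of_mem _ (List.mem_cons_of_mem _ (List.mem_cons_of_mem _ (List.mem_cons_of_mem _ (List.mem_cons_of_mem _ (List.mem_cons_of_mem _ (List.mem_cons_of_mem _ (List.mem_cons_of_mem _ (List.mem_cons_self)))))))), h⟩,
      ⟨_, List.mem_cons_of_mem _ (List.mem_cons_of_mem _ (List.mem_cons_of_mem _ (List.mem_cons_of_mem _ (List.mem_cons_of_mem _ (List.mem_cons_of_mem _ (List.mem_cons_of_mem _ (List.mem_cons_of_mem _ (List.mem_cons_of_mem _ (List.mem_cons_self))))))))), h⟩,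
      ⟨_, List.mem_cons_of_mem _ (List.mem_cons_of_mem _ (List.mem_cons_of_mem _ (List.mem_cons_of_mem _ (List.mem_cons_of_mem _ (List.mem_cons_of_mem _ (List.mem_cons_of_mem _ (List.mem_cons_of_mem _ (List.mem_cons_of_mem _ (List.mem_cons_of_mem _ (List.mem_cons_self)))))))))), h⟩]

set_option maxHeartbeats 1000000 in
lemma pvGroup_one : pvGroup 1 = ["soccer".toList, "premier-league".toList, "la-liga".toList, "serie-a".toList, "bundesliga".toList, "ligue-1".toList, "mls".toList] := by
  simp [pvGroup, pvEntries]

lemma pvCand1_iff (s : List Char) : pvCand s 1 ↔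
    (PySem.Chars.isIn "soccer".toList s = true ∨
     PySem.Chars.isIn "premier-league".toList s = true ∨
     PySem.Chars.isIn "la-liga".toList s = true ∨
     PySem.Chars.isIn "serie-a".toList s = true ∨
     PySem.Chars.isIn "bundesliga".toList s = true ∨
     PySem.Chars.isIn "ligue-1".toList s = true ∨
     PySem.Chars.isIn "mls".toList s = true) := by
  rw [pvCand_iff_group, pvGroup_one]
  constructor
  · rintro ⟨k, hk, hin⟩
    simp only [List.mem_cons, List.not_mem_nil, or_false] at hk
    rcases hk with rfl|rfl|rfl|rfl|rfl|rfl|rfl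
    exacts [Or.inl hin,
      Or.inr (Or.inl hin),
      Or.inr (Or.inr (Or.inl hin)),
      Or.inr (Or.inr (Or.inr (Or.inl hin))),
      Or.inr (Or.inr (Or.inr (Or.inr (Or.inl hin)))),
      Or.inr (Or.inr (Or.inr (Or.inr (Or.inr (Or.inl hin))))),
      Or.inr (Or.inr (Or.inr (Or.inr (Or.inr (Or.inr (hin))))))]
  · intro h
    rcases h with h|h|h|h|h|h|h
    exacts [⟨_, List.mem_cons_self, h⟩,
      ⟨_, List.mem_cons_of_mem _ (List.mem_cons_self), h⟩,
      ⟨_, List.mem_cons_of_mem _ (List.mem_cons_of_mem _ (List.mem_cons_self)), h⟩,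
      ⟨_, List.mem_cons_of_mem _ (List.mem_cons_of_mem _ (List.mem_cons_of_mem _ (List.mem_cons_self))), h⟩,
      ⟨_, List.mem_cons_of_mem _ (List.mem_cons_of_mem _ (List.mem_cons_of_mem _ (List.mem_cons_of_mem _ (List.mem_cons_self)))), h⟩,
      ⟨_, List.mem_cons_of_mem _ (List.mem_cons_of_mem _ (List.mem_cons_of_mem _ (List.mem_cons_of_mem _ (List.mem_cons_of_mem _ (List.mem_cons_self))))), h⟩,
      ⟨_, List.mem_cons_of_mem _ (List.mem_cons_of_mem _ (List.mem_cons_of_mem _ (List.mem_cons_of_mem _ (List.mem_cons_of_mem _ (List.mem_cons_of_mem _ (List.mem_cons_self)))))), h⟩]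

set_option maxHeartbeats 1000000 in
lemma pvGroup_two : pvGroup 2 = ["nba".toList, "basketball".toList, "euroleague".toList, "wnba".toList] := by
  simp [pvGroup, pvEntries]

lemma pvCand2_iff (s : List Char) : pvCand s 2 ↔
    (PySem.Chars.isIn "nba".toList s = true ∨
     PySem.Chars.isIn "basketball".toList s = true ∨
     PySem.Chars.isIn "euroleague".toList s = true ∨
     PySem.Chars.isIn "wnba".toList s = true) := by
  rw [pvCand_iff_group, pvGroup_two]
  constructor
  · rintro ⟨k, hk, hin⟩
    simp only [List.mem_cons, List.not_mem_nil, or_false] at hk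
    rcases hk with rfl|rfl|rfl|rfl
    exacts [Or.inl hin,
      Or.inr (Or.inl hin),
      Or.inr (Or.inr (Or.inl hin)),
      Or.inr (Or.inr (Or.inr (hin)))]
  · intro h
    rcases h with h|h|h|h
    exacts [⟨_, List.mem_cons_self, h⟩,
      ⟨_, List.mem_cons_of_mem _ (List.mem_cons_self), h⟩,
      ⟨_, List.mem_cons_of_mem _ (List.mem_cons_of_mem _ (List.mem_cons_self)), h⟩,
      ⟨_, List.mem_cons_of_mem _ (List.mem_cons_of_mem _ (List.mem_cons_of_mem _ (List.mem_cons_self))), h⟩]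

set_option maxHeartbeats 1000000 in
lemma pvGroup_three : pvGroup 3 = ["tennis".toList, "atp".toList, "wta".toList] := by
  simp [pvGroup, pvEntries]

lemma pvCand3_iff (s : List Char) : pvCand s 3 ↔
    (PySem.Chars.isIn "tennis".toList s = true ∨
     PySem.Chars.isIn "atp".toList s = true ∨
     PySem.Chars.isIn "wta".toList s = true) := by
  rw [pvCand_iff_group, pvGroup_three]
  constructor
  · rintro ⟨k, hk, hin⟩
    simp only [List.mem_cons, List.not_mem_nil, or_false] at hk
    rcases hk with rfl|rfl|rfl
    exacts [Or.inl hin,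
      Or.inr (Or.inl hin),
      Or.inr (Or.inr (hin))]
  · intro h
    rcases h with h|h|h
    exacts [⟨_, List.mem_cons_self, h⟩,
      ⟨_, List.mem_cons_of_mem _ (List.mem_cons_self), h⟩,
      ⟨_, List.mem_cons_of_mem _ (List.mem_cons_of_mem _ (List.mem_cons_self)), h⟩]

set_option maxHeartbeats 1000000 in
lemma pvGroup_four : pvGroup 4 = ["nhl".toList, "hockey".toList] := by
  simp [pvGroup, pvEntries]

lemma pvCand4_iff (s : List Char) : pvCand s 4 ↔
    (PySem.Chars.isIn "nhl".toList s = true ∨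
     PySem.Chars.isIn "hockey".toList s = true) := by
  rw [pvCand_iff_group, pvGroup_four]
  constructor
  · rintro ⟨k, hk, hin⟩
    simp only [List.mem_cons, List.not_mem_nil, or_false] at hk
    rcases hk with rfl|rfl
    exacts [Or.inl hin,
      Or.inr (hin)]
  · intro h
    rcases h with h|h
    exacts [⟨_, List.mem_cons_self, h⟩,
      ⟨_, List.mem_cons_of_mem _ (List.mem_cons_self), h⟩]

set_option maxHeartbeats 1000000 in
lemma pvGroup_five : pvGroup 5 = ["nfl".toList, "football".toList, "ncaa-football".toList] := by
  simp [pvGroup, pvEntries]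

lemma pvCand5_iff (s : List Char) : pvCand s 5 ↔
    (PySem.Chars.isIn "nfl".toList s = true ∨
     PySem.Chars.isIn "football".toList s = true ∨
     PySem.Chars.isIn "ncaa-football".toList s = true) := by
  rw [pvCand_iff_group, pvGroup_five]
  constructor
  · rintro ⟨k, hk, hin⟩
    simp only [List.mem_cons, List.not_mem_nil, or_false] at hk
    rcases hk with rfl|rfl|rfl
    exacts [Or.inl hin,
      Or.inr (Or.inl hin),
      Or.inr (Or.inr (hin))]
  · intro h
    rcases h with h|h|h
    exacts [⟨_, List.mem_cons_self, h⟩,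
      ⟨_, List.mem_cons_of_mem _ (List.mem_cons_self), h⟩,
      ⟨_, List.mem_cons_of_mem _ (List.mem_cons_of_mem _ (List.mem_cons_self)), h⟩]

set_option maxHeartbeats 1000000 in
lemma pvGroup_six : pvGroup 6 = ["baseball".toList, "mlb".toList] := by
  simp [pvGroup, pvEntries]

lemma pvCand6_iff (s : List Char) : pvCand s 6 ↔
    (PySem.Chars.isIn "baseball".toList s = true ∨
     PySem.Chars.isIn "mlb".toList s = true) := by
  rw [pvCand_iff_group, pvGroup_six]
  constructor
  · rintro ⟨k, hk, hin⟩
    simp only [List.mem_cons, List.not_mem_nil, or_false] at hk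
    rcases hk with rfl|rfl
    exacts [Or.inl hin,
      Or.inr (hin)]
  · intro h
    rcases h with h|h
    exacts [⟨_, List.mem_cons_self, h⟩,
      ⟨_, List.mem_cons_of_mem _ (List.mem_cons_self), h⟩]

set_option maxHeartbeats 1000000 in
lemma pvGroup_seven : pvGroup 7 = ["vs".toList, "defeats".toList, "beats".toList] := by
  simp [pvGroup, pvEntries]

lemma pvCand7_iff (s : List Char) : pvCand s 7 ↔
    (PySem.Chars.isIn "vs".toList s = true ∨
     PySem.Chars.isIn "defeats".toList s = true ∨
     PySem.Chars.isIn "beats".toList s = true) := by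
  rw [pvCand_iff_group, pvGroup_seven]
  constructor
  · rintro ⟨k, hk, hin⟩
    simp only [List.mem_cons, List.not_mem_nil, or_false] at hk
    rcases hk with rfl|rfl|rfl
    exacts [Or.inl hin,
      Or.inr (Or.inl hin),
      Or.inr (Or.inr (hin))]
  · intro h
    rcases h with h|h|h
    exacts [⟨_, List.mem_cons_self, h⟩,
      ⟨_, List.mem_cons_of_mem _ (List.mem_cons_self), h⟩,
      ⟨_, List.mem_cons_of_mem _ (List.mem_cons_of_mem _ (List.mem_cons_self)), h⟩]

lemma pvBest_eq_of (s : List Char) (r : Nat) (hr : pvCand s r)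
    (hlt : ∀ r' < r, ¬ pvCand s r') : pvBest s = r := by
  have h1 := pvBest_min s hr
  have h2 := pvCand_le s hr
  rcases pvBest_achieved s with h | h
  · omega
  · by_contra hne
    exact hlt _ (by omega) h

lemma pvBest_eq_eight (s : List Char) (hlt : ∀ r' ≤ 7, ¬ pvCand s r') : pvBest s = 8 := by
  rcases pvBest_achieved s with h | h
  · exact h
  · exact absurd h (hlt _ (pvCand_le s h))

-- ===== VERDICT (by name: the statement is the Claim_ definition above) =====
set_option maxHeartbeats 1000000 in
theorem detect_sport_spec : Claim_equal_detect_sport := by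
  intro slug _
  unfold Spec_detect_sport detect_sport detect_sport_alt
  simp only [List.any_cons, List.any_nil, Bool.or_false, Bool.or_assoc, PySem.Str.isIn_eq]
  set s := (PySem.Str.lower slug).toList with hs
  cases hE0 : (PySem.Chars.isIn "election".toList s || (PySem.Chars.isIn "politics".toList s || (PySem.Chars.isIn "senate".toList s || (PySem.Chars.isIn "governor".toList s || (PySem.Chars.isIn "president".toList s || (PySem.Chars.isIn "crypto".toList s || (PySem.Chars.isIn "bitcoin".toList s || (PySem.Chars.isIn "eth".toList s || (PySem.Chars.isIn "price".toList s || (PySem.Chars.isIn "movie".toList s || (PySem.Chars.isIn "oscars".toList s))))))))))) with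
  | true =>
    simp only [Bool.or_eq_true] at hE0
    have hc0 : pvCand s 0 := (pvCand0_iff s).mpr hE0
    rw [pvBest_eq_of s 0 hc0 (by omega)]
    rfl
  | false =>
    have hn0 : ¬ pvCand s 0 := by
      intro hc
      rcases (pvCand0_iff s).mp hc with h|h|h|h|h|h|h|h|h|h|h <;>
        simp only [h, Bool.true_or, Bool.or_true, Bool.true_eq_false] at hE0
    cases hE1 : (PySem.Chars.isIn "soccer".toList s || (PySem.Chars.isIn "premier-league".toList s || (PySem.Chars.isIn "la-liga".toList s || (PySem.Chars.isIn "serie-a".toList s || (PySem.Chars.isIn "bundesliga".toList s || (PySem.Chars.isIn "ligue-1".toList s || (PySem.Chars.isIn "mls".toList s))))))) with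
    | true =>
      simp only [Bool.or_eq_true] at hE1
      have hc1 : pvCand s 1 := (pvCand1_iff s).mpr hE1
      rw [pvBest_eq_of s 1 hc1 (by intro r' hr'; interval_cases r' <;> assumption)]
      rfl
    | false =>
      have hn1 : ¬ pvCand s 1 := by
        intro hc
        rcases (pvCand1_iff s).mp hc with h|h|h|h|h|h|h <;>
          simp only [h, Bool.true_or, Bool.or_true, Bool.true_eq_false] at hE1
      cases hE2 : (PySem.Chars.isIn "nba".toList s || (PySem.Chars.isIn "basketball".toList s || (PySem.Chars.isIn "euroleague".toList s || (PySem.Chars.isIn "wnba".toList s)))) with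
      | true =>
        simp only [Bool.or_eq_true] at hE2
        have hc2 : pvCand s 2 := (pvCand2_iff s).mpr hE2
        rw [pvBest_eq_of s 2 hc2 (by intro r' hr'; interval_cases r' <;> assumption)]
        rfl
      | false =>
        have hn2 : ¬ pvCand s 2 := by
          intro hc
          rcases (pvCand2_iff s).mp hc with h|h|h|h <;>
            simp only [h, Bool.true_or, Bool.or_true, Bool.true_eq_false] at hE2
        cases hE3 : (PySem.Chars.isIn "tennis".toList s || (PySem.Chars.isIn "atp".toList s || (PySem.Chars.isIn "wta".toList s))) with
        | true =>
          simp only [Bool.or_eq_true] at hE3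
          have hc3 : pvCand s 3 := (pvCand3_iff s).mpr hE3
          rw [pvBest_eq_of s 3 hc3 (by intro r' hr'; interval_cases r' <;> assumption)]
          rfl
        | false =>
          have hn3 : ¬ pvCand s 3 := by
            intro hc
            rcases (pvCand3_iff s).mp hc with h|h|h <;>
              simp only [h, Bool.true_or, Bool.or_true, Bool.true_eq_false] at hE3
          cases hE4 : (PySem.Chars.isIn "nhl".toList s || (PySem.Chars.isIn "hockey".toList s)) with
          | true =>
            simp only [Bool.or_eq_true] at hE4
            have hc4 : pvCand s 4 := (pvCand4_iff s).mpr hE4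
            rw [pvBest_eq_of s 4 hc4 (by intro r' hr'; interval_cases r' <;> assumption)]
            rfl
          | false =>
            have hn4 : ¬ pvCand s 4 := by
              intro hc
              rcases (pvCand4_iff s).mp hc with h|h <;>
                simp only [h, Bool.true_or, Bool.or_true, Bool.true_eq_false] at hE4
            cases hE5 : (PySem.Chars.isIn "nfl".toList s || (PySem.Chars.isIn "football".toList s || (PySem.Chars.isIn "ncaa-football".toList s))) with
            | true =>
              simp only [Bool.or_eq_true] at hE5
              have hc5 : pvCand s 5 := (pvCand5_iff s).mpr hE5
              rw [pvBest_eq_of s 5 hc5 (by intro r' hr'; interval_cases r' <;> assumption)]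
              rfl
            | false =>
              have hn5 : ¬ pvCand s 5 := by
                intro hc
                rcases (pvCand5_iff s).mp hc with h|h|h <;>
                  simp only [h, Bool.true_or, Bool.or_true, Bool.true_eq_false] at hE5
              cases hE6 : (PySem.Chars.isIn "baseball".toList s || (PySem.Chars.isIn "mlb".toList s)) with
              | true =>
                simp only [Bool.or_eq_true] at hE6
                have hc6 : pvCand s 6 := (pvCand6_iff s).mpr hE6
                rw [pvBest_eq_of s 6 hc6 (by intro r' hr'; interval_cases r' <;> assumption)]
                rfl
              | false =>
                have hn6 : ¬ pvCand s 6 := by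
                  intro hc
                  rcases (pvCand6_iff s).mp hc with h|h <;>
                    simp only [h, Bool.true_or, Bool.or_true, Bool.true_eq_false] at hE6
                cases hE7 : (PySem.Chars.isIn "vs".toList s || (PySem.Chars.isIn "defeats".toList s || (PySem.Chars.isIn "beats".toList s))) with
                | true =>
                  simp only [Bool.or_eq_true] at hE7
                  have hc7 : pvCand s 7 := (pvCand7_iff s).mpr hE7
                  rw [pvBest_eq_of s 7 hc7 (by intro r' hr'; interval_cases r' <;> assumption)]
                  rfl
                | false =>
                  have hn7 : ¬ pvCand s 7 := by
                    intro hc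
                    rcases (pvCand7_iff s).mp hc with h|h|h <;>
                      simp only [h, Bool.true_or, Bool.or_true, Bool.true_eq_false] at hE7
                  rw [pvBest_eq_eight s (by intro r' hr'; interval_cases r' <;> assumption)]
                  rfl
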